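-- pv_equiv track=rewrite | github.com/nathanieljwise/PersonalProjects | misc/scale_calculator.py | major_scale
-- ===== SOURCE A (Python) =====
-- MUSICAL_NOTES = ['C', 'D\u266d', 'D', 'E\u266d', 'E', 'F', 'G\u266d', 'G', 'A\u266d', 'A', 'B\u266d', 'B']
--
-- MAJOR_SCALE = [2, 2, 1, 2, 2, 2, 1]
--
-- def major_scale(first_note):
--     musical_notes = MUSICAL_NOTES * 2  # Elongate scale to avoid range errors
--     user_note_list = [musical_notes[first_note]]  # Start list to keep notes in scale
--     next_note = first_note  # Rename to avoid confusion
--     for i in range(0, len(MAJOR_SCALE)):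
--         user_note_list = user_note_list + [musical_notes[next_note + MAJOR_SCALE[i]]]  # Put next note in list
--         next_note = next_note + int(MAJOR_SCALE[i])  # Interval dictated by major scale sequence
--     return user_note_list
-- ===== SOURCE B (Python) =====
-- MUSICAL_NOTES = ['C', 'D\u266d', 'D', 'E\u266d', 'E', 'F', 'G\u266d', 'G', 'A\u266d', 'A', 'B\u266d', 'B']
--
-- MAJOR_SCALE = [2, 2, 1, 2, 2, 2, 1]
--
-- def major_scale(first_note):
--     musical_notes = MUSICAL_NOTES * 2
--     offsets = [sum(MAJOR_SCALE[:k]) for k in range(len(MAJOR_SCALE) + 1)]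
--     return [musical_notes[first_note + off] for off in offsets]
-- ===== Notes on version B (the rewrite author's own statement) =====
-- stated objective: simpler
-- what changed: B precomputes the cumulative semitone offsets as prefix sums of MAJOR_SCALE and produces the scale in one mapping pass over the doubled note table, instead of threading a running index and repeated list concatenation through a loop.
-- outside the precondition, e.g. on major_scale(12): A raises IndexError, B raises IndexError
import Mathlib
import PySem

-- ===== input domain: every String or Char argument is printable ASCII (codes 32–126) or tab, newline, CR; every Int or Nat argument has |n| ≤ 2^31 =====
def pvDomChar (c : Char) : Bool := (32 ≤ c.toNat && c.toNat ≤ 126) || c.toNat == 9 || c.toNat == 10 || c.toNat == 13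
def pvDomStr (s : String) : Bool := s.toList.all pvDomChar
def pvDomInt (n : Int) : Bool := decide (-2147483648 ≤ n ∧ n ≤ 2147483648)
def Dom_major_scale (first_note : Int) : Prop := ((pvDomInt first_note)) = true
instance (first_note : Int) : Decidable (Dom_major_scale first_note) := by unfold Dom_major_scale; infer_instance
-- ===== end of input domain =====

-- B separates the cumulative-offset computation (prefix sums of MAJOR_SCALE) from the note
-- lookup (one mapping pass), instead of threading a running index through an append loop;
-- objective: simpler decomposition, same cost.

def MUSICAL_NOTES : List String := ["C", "D♭", "D", "E♭", "E", "F", "G♭", "G", "A♭", "A", "B♭", "B"]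

def MAJOR_SCALE : List Int := [2, 2, 1, 2, 2, 2, 1]

-- ===== PORT A =====
def major_scale (first_note : Int) : List String :=
  let musical_notes := MUSICAL_NOTES ++ MUSICAL_NOTES
  let st := (PySem.List.pyRange 0 (MAJOR_SCALE.length : Int) 1).foldl
    (fun (st : List String × Int) i =>
      (st.1 ++ [PySem.List.pyGetD musical_notes (st.2 + PySem.List.pyGetD MAJOR_SCALE i 0) ""],
       st.2 + PySem.List.pyGetD MAJOR_SCALE i 0))
    ([PySem.List.pyGetD musical_notes first_note ""], first_note)
  st.1

-- ===== PORT B =====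
def major_scale_alt (first_note : Int) : List String :=
  let musical_notes := MUSICAL_NOTES ++ MUSICAL_NOTES
  let offsets := (PySem.List.pyRange 0 ((MAJOR_SCALE.length : Int) + 1) 1).map
    (fun k => (PySem.List.slice MAJOR_SCALE none (some k)).sum)
  offsets.map (fun off => PySem.List.pyGetD musical_notes (first_note + off) "")

-- ===== PRECONDITION & SPEC =====
-- Pre_ excludes exactly the inputs on which A raises IndexError (indexing past the doubled
-- 24-entry note table: first_note < -24 or first_note + 12 > 23).
def Pre_major_scale (first_note : Int) : Prop := -24 ≤ first_note ∧ first_note ≤ 11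
instance (first_note : Int) : Decidable (Pre_major_scale first_note) := by unfold Pre_major_scale; infer_instance
def pvWitness_major_scale : Int := 0
def Spec_major_scale (first_note : Int) (out : List String) : Prop := out = major_scale_alt first_note
instance (first_note : Int) (out : List String) : Decidable (Spec_major_scale first_note out) := by unfold Spec_major_scale; infer_instance

-- ===== CLAIM (what is proved, stated in full; the proofs are below) =====
def Claim_equal_major_scale : Prop := ∀ (first_note : Int), Dom_major_scale first_note → Pre_major_scale first_note → Spec_major_scale first_note (major_scale first_note)

-- ===== LEMMAS AND PROOFS =====

-- ===== VERDICT (by name: the statement is the Claim_ definition above) =====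
theorem major_scale_spec : Claim_equal_major_scale := by
  intro first_note _ hpre
  obtain ⟨h1, h2⟩ := hpre
  unfold Spec_major_scale
  interval_cases first_note <;> decide
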